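-- pv_equiv track=rewrite | github.com/PavelYartsev/AIAgentDemo | PiplineMain.py | _generate_tree_string
-- ===== SOURCE A (Python) =====
-- def _generate_tree_string(paths: list[str], root_dir: str) -> str:
--     # Create a nested dict from paths
--     tree = {}
--     for path in sorted(paths):
--         # remove root_dir prefix
--         parts = path.replace(f"{root_dir}/", "", 1).split('/')
--         node = tree
--         for part in parts:
--             node = node.setdefault(part, {})
--
--     # Recursively build the string
--     def build_string(node, indent=""):
--         lines = []
--         sorted_items = sorted(node.items())
--         for i, (name, children) in enumerate(sorted_items):
--             is_last = i == (len(sorted_items) - 1)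
--             connector = "└── " if is_last else "├── "
--             lines.append(f"{indent}{connector}{name}")
--             if children:
--                 child_indent = "    " if is_last else "│   "
--                 lines.extend(build_string(children, indent + child_indent))
--         return lines
--
--     tree_lines = build_string(tree)
--     return f"{root_dir}/\n" + "\n".join(tree_lines)
-- ===== SOURCE B (Python) =====
-- def _generate_tree_string(paths: list[str], root_dir: str) -> str:
--     # Same nested-dict construction as the original; rendering replaced by an
--     # explicit-stack iterative DFS instead of recursion.
--     tree = {}
--     for path in sorted(paths):
--         parts = path.replace(f"{root_dir}/", "", 1).split('/')
--         node = tree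
--         for part in parts:
--             node = node.setdefault(part, {})
--
--     lines = []
--     stack = []
--
--     def push(node, indent):
--         items = sorted(node.items())
--         n = len(items)
--         for i in range(n - 1, -1, -1):
--             name, children = items[i]
--             stack.append((name, children, indent, i == n - 1))
--
--     push(tree, "")
--     while stack:
--         name, children, indent, is_last = stack.pop()
--         lines.append(f"{indent}{'└── ' if is_last else '├── '}{name}")
--         if children:
--             push(children, indent + ("    " if is_last else "│   "))
--
--     return f"{root_dir}/\n" + "\n".join(lines)
-- ===== Notes on version B (the rewrite author's own statement) =====
-- stated objective: alternative
-- what changed: The recursive build_string renderer is replaced by an explicit-stack iterative pre-order DFS (frames of (name, children, indent, is_last) pushed in reverse sorted order); the nested-dict construction is unchanged.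
import Mathlib
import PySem

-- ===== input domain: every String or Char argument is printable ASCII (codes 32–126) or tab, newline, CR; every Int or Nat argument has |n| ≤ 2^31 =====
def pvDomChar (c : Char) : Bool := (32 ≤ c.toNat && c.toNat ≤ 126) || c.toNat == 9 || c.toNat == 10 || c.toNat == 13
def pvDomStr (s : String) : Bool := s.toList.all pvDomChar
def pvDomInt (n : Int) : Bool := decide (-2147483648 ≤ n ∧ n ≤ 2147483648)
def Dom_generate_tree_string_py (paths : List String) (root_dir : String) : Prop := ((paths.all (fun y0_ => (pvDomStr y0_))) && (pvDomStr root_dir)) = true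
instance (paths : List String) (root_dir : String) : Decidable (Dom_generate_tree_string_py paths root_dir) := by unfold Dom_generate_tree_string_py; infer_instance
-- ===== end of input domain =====

-- B replaces A's recursive build_string with an explicit-stack iterative DFS (alternative
-- decomposition, same cost); the nested-dict construction is unchanged.

-- Shared data structure: Python's nested dict-of-dicts. PySem.Dict cannot hold a recursively
-- nested value type, so the dict is ported by hand as an insertion-ordered association
-- structure (cons name children restSiblings); exact for this program because keys are unique.
inductive Forest : Type where
  | nil : Forest
  | cons : String → Forest → Forest → Forest
deriving DecidableEq, Repr

def Forest.items : Forest → List (String × Forest)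
  | .nil => []
  | .cons k c r => (k, c) :: Forest.items r

def Forest.weight : Forest → Nat
  | .nil => 1
  | .cons _ c r => 1 + c.weight + r.weight

-- (termination measures for the ports)
def itemsWeight (l : List (String × Forest)) : Nat := (l.map (fun p => 1 + p.2.weight)).sum

theorem itemsWeight_sorted (l : List (String × Forest)) :
    itemsWeight (PySem.List.sorted l (fun x => x.1) false) = itemsWeight l := by
  unfold itemsWeight
  exact ((PySem.List.sorted_perm l (fun x => x.1) false).map
    (fun p : String × Forest => 1 + p.2.weight)).sum_eq

theorem itemsWeight_cons (name : String) (children : Forest) (rest : List (String × Forest)) :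
    itemsWeight ((name, children) :: rest) = (1 + children.weight) + itemsWeight rest := rfl

theorem itemsWeight_items_lt (f : Forest) : itemsWeight f.items < f.weight := by
  induction f with
  | nil => exact Nat.zero_lt_one
  | cons k c r ihc ihr =>
    exact show (1 + c.weight) + itemsWeight (Forest.items r) < (1 + c.weight) + r.weight from
      Nat.add_lt_add_left ihr (1 + c.weight)

theorem dec_child_sorted (name : String) (children : Forest) (rest : List (String × Forest)) :
    itemsWeight (PySem.List.sorted children.items (fun x => x.1) false) <
      itemsWeight ((name, children) :: rest) := by
  rw [itemsWeight_sorted, itemsWeight_cons]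
  exact Nat.lt_of_lt_of_le (itemsWeight_items_lt children)
    (Nat.le_trans (Nat.le_add_left children.weight 1) (Nat.le_add_right _ _))

theorem dec_rest (name : String) (children : Forest) (rest : List (String × Forest)) :
    itemsWeight rest < itemsWeight ((name, children) :: rest) := by
  rw [itemsWeight_cons]
  exact Nat.lt_add_of_pos_left (Nat.lt_of_lt_of_le Nat.zero_lt_one (Nat.le_add_right 1 _))

def frameWeight (fr : String × Forest × String × Bool) : Nat := 1 + fr.2.1.weight

theorem dec_stack_tail (fr : String × Forest × String × Bool)
    (stack : List (String × Forest × String × Bool)) :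
    ((stack.map frameWeight).sum) < (((fr :: stack).map frameWeight).sum) :=
  Nat.lt_add_of_pos_left (Nat.lt_of_lt_of_le Nat.zero_lt_one (Nat.le_add_right 1 _))

-- path.replace(root_dir + "/", "", 1): PySem.Str.replace has no count argument, so the
-- count=1 form is ported by hand (exact: removes the first occurrence of old, if any).
def replaceOnce (s old : String) : String :=
  let cs := s.toList
  let o := old.toList
  let i := PySem.Chars.find cs o
  if i = -1 then s else String.ofList (cs.take i.toNat ++ cs.drop (i.toNat + o.length))

-- node.setdefault(part, {}): look up the child (empty dict if absent) …
def getChild : Forest → String → Forest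
  | .nil, _ => .nil
  | .cons k kc r, p => if k = p then kc else getChild r p

-- … and store the updated child back (overwrite in place; new keys append)
def setChild : Forest → String → Forest → Forest
  | .nil, p, c => .cons p c .nil
  | .cons k kc r, p, c => if k = p then .cons k c r else .cons k kc (setChild r p c)

-- the 'for part in parts: node = node.setdefault(part, {})' walk, on the hand-ported dict
def insertPath : Forest → List String → Forest
  | f, [] => f
  | f, p :: ps => setChild f p (insertPath (getChild f p) ps)

-- the 'tree = {}; for path in sorted(paths): …' construction loop (shared verbatim by A and B)
def buildTree (paths : List String) (root_dir : String) : Forest :=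
  (PySem.List.sorted paths (fun x => x) false).foldl
    (fun tree path =>
      -- split('/'): sep "/" ≠ "" so split? is always some; the default is never used
      insertPath tree ((PySem.Str.split? (replaceOnce path (root_dir ++ "/")) "/").getD []))
    Forest.nil

-- ===== PORT A =====
-- A's recursive build_string(node, indent): the 'for i, (name, children) in
-- enumerate(sorted_items)' body, is_last = (i == len-1) rendered as rest.isEmpty;
-- the recursion into a child node is inlined here (build_string's own body is the
-- non-recursive wrapper buildString below)
def buildItems : List (String × Forest) → String → List String
  | [], _ => []
  | (name, children) :: rest, indent =>
      let is_last := rest.isEmpty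
      let connector := if is_last then "└── " else "├── "
      ((indent ++ connector ++ name) ::
        (if children = Forest.nil then []
         else buildItems (PySem.List.sorted children.items (fun x => x.1) false)
                (indent ++ (if is_last then "    " else "│   "))))
        ++ buildItems rest indent
termination_by l _ => itemsWeight l
decreasing_by
  · exact dec_child_sorted name children rest
  · exact dec_rest name children rest

def buildString (f : Forest) (indent : String) : List String :=
  buildItems (PySem.List.sorted f.items (fun x => x.1) false) indent

def generate_tree_string_py (paths : List String) (root_dir : String) : String :=
  let tree := buildTree paths root_dir
  root_dir ++ "/\n" ++ PySem.Str.join "\n" (buildString tree "")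

-- ===== PORT B =====
-- B's push(node, indent): frames for the sorted items, ascending; the Python loop appends
-- them in reverse index order so the stack top (= head of the Lean list) is the first item;
-- is_last = (i == n-1) is rendered as rest.isEmpty
def mkFrames (indent : String) : List (String × Forest) → List (String × Forest × String × Bool)
  | [] => []
  | (name, children) :: rest => (name, children, indent, rest.isEmpty) :: mkFrames indent rest

theorem stackWeight_mkFrames (indent : String) (l : List (String × Forest)) :
    ((mkFrames indent l).map frameWeight).sum = itemsWeight l := by
  induction l with
  | nil => rfl
  | cons p rest ih =>
    exact show (1 + p.2.weight) + ((mkFrames indent rest).map frameWeight).sum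
        = (1 + p.2.weight) + itemsWeight rest from congrArg _ ih

theorem dec_stack_push (name : String) (children : Forest) (indent ci : String) (is_last : Bool)
    (stack : List (String × Forest × String × Bool)) :
    (((mkFrames ci (PySem.List.sorted children.items (fun x => x.1) false) ++ stack).map
        frameWeight).sum) <
      ((((name, children, indent, is_last) :: stack).map frameWeight).sum) := by
  rw [List.map_append, List.sum_append, stackWeight_mkFrames, itemsWeight_sorted]
  exact Nat.add_lt_add_right
    (Nat.lt_of_lt_of_le (itemsWeight_items_lt children) (Nat.le_add_left children.weight 1)) _

-- B's 'while stack:' loop; the stack is a Lean list with its head as the stack top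
def dfsLoop : List (String × Forest × String × Bool) → List String → List String
  | [], lines => lines
  | (name, children, indent, is_last) :: stack, lines =>
      let line := indent ++ (if is_last then "└── " else "├── ") ++ name
      if children = Forest.nil then
        dfsLoop stack (lines ++ [line])
      else
        dfsLoop (mkFrames (indent ++ (if is_last then "    " else "│   "))
                   (PySem.List.sorted children.items (fun x => x.1) false) ++ stack)
                (lines ++ [line])
termination_by stack _ => (stack.map frameWeight).sum
decreasing_by
  · exact dec_stack_tail (name, children, indent, is_last) stack
  · exact dec_stack_push name children indent _ is_last stack

def generate_tree_string_py_alt (paths : List String) (root_dir : String) : String :=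
  let tree := buildTree paths root_dir
  root_dir ++ "/\n" ++
    PySem.Str.join "\n"
      (dfsLoop (mkFrames "" (PySem.List.sorted tree.items (fun x => x.1) false)) [])

-- ===== PRECONDITION & SPEC =====
def Spec_generate_tree_string_py (paths : List String) (root_dir : String) (out : String) : Prop := out = generate_tree_string_py_alt paths root_dir
instance (paths : List String) (root_dir : String) (out : String) : Decidable (Spec_generate_tree_string_py paths root_dir out) := by unfold Spec_generate_tree_string_py; infer_instance

-- ===== CLAIM (what is proved, stated in full; the proofs are below) =====
def Claim_equal_generate_tree_string_py : Prop := ∀ (paths : List String) (root_dir : String), Dom_generate_tree_string_py paths root_dir → Spec_generate_tree_string_py paths root_dir (generate_tree_string_py paths root_dir)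

-- ===== LEMMAS AND PROOFS =====

-- what one stack frame contributes to the output
def renderFrame : String × Forest × String × Bool → List String
  | (name, children, indent, is_last) =>
      (indent ++ (if is_last then "└── " else "├── ") ++ name) ::
        (if children = Forest.nil then []
         else buildString children (indent ++ (if is_last then "    " else "│   ")))

theorem buildItems_eq_flatMap (l : List (String × Forest)) (indent : String) :
    buildItems l indent = (mkFrames indent l).flatMap renderFrame := by
  induction l with
  | nil => simp [buildItems.eq_1, mkFrames]
  | cons p rest ih =>
    cases p with
    | mk name children =>
      rw [buildItems.eq_def]
      simp only [mkFrames, List.flatMap_cons, renderFrame, ih, buildString]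

theorem dfsLoop_eq (stack : List (String × Forest × String × Bool)) (lines : List String) :
    dfsLoop stack lines = lines ++ stack.flatMap renderFrame := by
  fun_induction dfsLoop stack lines with
  | case1 lines => simp
  | case2 name indent is_last stack lines line ih =>
    rw [ih]
    simp [renderFrame, line]
  | case3 name children indent is_last stack lines line hnil ih =>
    simp only [dite_eq_ite] at ih
    rw [ih]
    simp only [List.flatMap_append, ← buildItems_eq_flatMap, ← buildString.eq_def,
      List.flatMap_cons, renderFrame]
    simp [line, hnil]

-- ===== VERDICT (by name: the statement is the Claim_ definition above) =====
theorem generate_tree_string_py_spec : Claim_equal_generate_tree_string_py := by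
  intro paths root_dir _
  show generate_tree_string_py paths root_dir = generate_tree_string_py_alt paths root_dir
  show root_dir ++ "/\n" ++ PySem.Str.join "\n" (buildString (buildTree paths root_dir) "")
     = root_dir ++ "/\n" ++ PySem.Str.join "\n"
         (dfsLoop (mkFrames ""
           (PySem.List.sorted (buildTree paths root_dir).items (fun x => x.1) false)) [])
  rw [dfsLoop_eq, ← buildItems_eq_flatMap, List.nil_append, ← buildString.eq_def]
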